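-- pv_equiv track=rewrite | github.com/debbie-drg/advent-of-code-2015 | Day3/day3.py | houses_visited_with_robot
-- ===== SOURCE A (Python) =====
-- DIRECTIONS_DICT = {"^": (1, 0), "v": (-1, 0), ">": (0, 1), "<": (0, -1)}
--
-- def sum_tuple(tuple_1: tuple[int, int], tuple_2: tuple[int, int]) -> tuple[int, int]:
--     return (tuple_1[0] + tuple_2[0], tuple_1[1] + tuple_2[1])
--
-- def houses_visited_with_robot(instructions: str) -> int:
--     visited = {(0,0)}
--     santa_location = (0,0)
--     robosanta_location = (0,0)
--     for index, instruction in enumerate(instructions):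
--         if index % 2 == 0:
--             santa_location = sum_tuple(santa_location, DIRECTIONS_DICT[instruction])
--             visited.add(santa_location)
--         else:
--             robosanta_location = sum_tuple(robosanta_location, DIRECTIONS_DICT[instruction])
--             visited.add(robosanta_location)
--     return len(visited)
-- ===== SOURCE B (Python) =====
-- DIRECTIONS_DICT = {"^": (1, 0), "v": (-1, 0), ">": (0, 1), "<": (0, -1)}
--
-- def houses_visited_with_robot(instructions: str) -> int:
--     visited = {(0, 0)}
--     for moves in (instructions[::2], instructions[1::2]):
--         x, y = 0, 0
--         for instruction in moves:
--             dx, dy = DIRECTIONS_DICT[instruction]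
--             x, y = x + dx, y + dy
--             visited.add((x, y))
--     return len(visited)
-- ===== Notes on version B (the rewrite author's own statement) =====
-- stated objective: alternative
-- what changed: B splits the instructions by parity into Santa's and Robo-Santa's move strings up front (instructions[::2] / instructions[1::2]) and runs two independent path walks over one shared visited set, removing the index%2 branch and the interleaved three-part state of A's single enumerate loop.
import Mathlib
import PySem

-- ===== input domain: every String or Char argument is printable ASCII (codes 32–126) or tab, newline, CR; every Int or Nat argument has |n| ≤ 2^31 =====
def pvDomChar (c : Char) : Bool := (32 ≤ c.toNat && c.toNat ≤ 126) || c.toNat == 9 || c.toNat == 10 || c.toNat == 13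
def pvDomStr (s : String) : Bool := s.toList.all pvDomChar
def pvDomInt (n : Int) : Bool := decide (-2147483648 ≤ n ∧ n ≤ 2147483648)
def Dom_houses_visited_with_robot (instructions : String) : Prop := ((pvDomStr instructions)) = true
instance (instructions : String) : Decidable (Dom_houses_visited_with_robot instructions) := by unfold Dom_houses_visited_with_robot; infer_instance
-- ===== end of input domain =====

-- B splits the instructions by parity into the two agents' move strings and walks each path
-- separately over one shared visited set (alternative decomposition, same O(n) cost);
-- proved equal to A's interleaved single pass on instructions made only of the four direction characters (A raises KeyError otherwise).


-- ===== PORT A =====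
def pvDirections : PySem.Dict Char (Int × Int) :=
  PySem.Dict.ofList [('^', (1, 0)), ('v', (-1, 0)), ('>', (0, 1)), ('<', (0, -1))]

def sum_tuple (tuple_1 tuple_2 : Int × Int) : Int × Int :=
  (tuple_1.1 + tuple_2.1, tuple_1.2 + tuple_2.2)

-- DIRECTIONS_DICT[instruction]: total form via getD, exact under Pre_ (no KeyError)
def pvLookup (c : Char) : Int × Int := PySem.Dict.getD pvDirections c (0, 0)

def houses_visited_with_robot (instructions : String) : Int :=
  let st := (PySem.List.enumerate instructions.toList 0).foldl
    (fun (st : PySem.Set (Int × Int) × (Int × Int) × (Int × Int)) p =>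
      let (visited, santa_location, robosanta_location) := st
      if PySem.Int.mod p.1 2 = 0 then
        let santa_location := sum_tuple santa_location (pvLookup p.2)
        (PySem.Set.add visited santa_location, santa_location, robosanta_location)
      else
        let robosanta_location := sum_tuple robosanta_location (pvLookup p.2)
        (PySem.Set.add visited robosanta_location, santa_location, robosanta_location))
    (PySem.Set.ofList [((0 : Int), (0 : Int))], ((0 : Int), (0 : Int)), ((0 : Int), (0 : Int)))
  PySem.Set.len st.1

-- ===== PORT B =====
def houses_visited_with_robot_alt (instructions : String) : Int :=
  let visited :=
    [(PySem.List.slice? instructions.toList none none 2).getD [],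
     (PySem.List.slice? instructions.toList (some 1) none 2).getD []].foldl
    (fun (visited : PySem.Set (Int × Int)) moves =>
      (moves.foldl
        (fun (st : PySem.Set (Int × Int) × Int × Int) instruction =>
          let (visited, x, y) := st
          let d := pvLookup instruction
          let x := x + d.1
          let y := y + d.2
          (PySem.Set.add visited (x, y), x, y))
        (visited, (0 : Int), (0 : Int))).1)
    (PySem.Set.ofList [((0 : Int), (0 : Int))])
  PySem.Set.len visited

-- ===== PRECONDITION & SPEC =====
-- Pre_ excludes exactly the instructions containing a character that is not one of the four direction characters,
-- on which Python A raises KeyError.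
def Pre_houses_visited_with_robot (instructions : String) : Prop :=
  (instructions.toList.all (fun c => c == '^' || c == 'v' || c == '>' || c == '<')) = true
instance (instructions : String) : Decidable (Pre_houses_visited_with_robot instructions) := by unfold Pre_houses_visited_with_robot; infer_instance
def pvWitness_houses_visited_with_robot : String := "^v<>^"

def Spec_houses_visited_with_robot (instructions : String) (out : Int) : Prop := out = houses_visited_with_robot_alt instructions
instance (instructions : String) (out : Int) : Decidable (Spec_houses_visited_with_robot instructions out) := by unfold Spec_houses_visited_with_robot; infer_instance

-- ===== CLAIM (what is proved, stated in full; the proofs are below) =====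
def Claim_equal_houses_visited_with_robot : Prop := ∀ (instructions : String), Dom_houses_visited_with_robot instructions → Pre_houses_visited_with_robot instructions → Spec_houses_visited_with_robot instructions (houses_visited_with_robot instructions)

-- ===== LEMMAS AND PROOFS =====

-- elements at even / odd indices
def pvEvens {α : Type} : List α → List α
  | [] => []
  | [a] => [a]
  | a :: _ :: t => a :: pvEvens t
def pvOdds {α : Type} : List α → List α
  | [] => []
  | _ :: t => pvEvens t

theorem pvEvens_cons {α : Type} (a : α) (l : List α) : pvEvens (a :: l) = a :: pvOdds l := by
  cases l <;> rfl

-- successive positions of one walker starting at p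
def pvPath (p : Int × Int) : List Char → List (Int × Int)
  | [] => []
  | c :: cs =>
    let q := (p.1 + (pvLookup c).1, p.2 + (pvLookup c).2)
    q :: pvPath q cs

-- successive positions inserted by A's interleaved loop (the two walkers swap roles each step)
def pvIPath (s r : Int × Int) : List Char → List (Int × Int)
  | [] => []
  | c :: cs =>
    let q := (s.1 + (pvLookup c).1, s.2 + (pvLookup c).2)
    q :: pvIPath r q cs

theorem pvIPath_perm (l : List Char) : ∀ s r,
    (pvIPath s r l).Perm (pvPath s (pvEvens l) ++ pvPath r (pvOdds l)) := by
  induction l using pvEvens.induct with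
  | case1 => intro s r; simp [pvIPath, pvEvens, pvOdds, pvPath]
  | case2 c => intro s r; simp [pvIPath, pvEvens, pvOdds, pvPath]
  | case3 c c2 t ih =>
    intro s r
    simp only [pvIPath, pvEvens, pvOdds, pvPath, pvEvens_cons]
    refine List.Perm.cons _ ?_
    refine (List.Perm.cons _ (ih _ _)).trans ?_
    exact List.perm_middle.symm

theorem pv_fm_evens {α : Type} (xs : List α) :
    List.filterMap (fun k : Nat => xs[2 * k]?) (List.range ((xs.length + 1) / 2)) = pvEvens xs := by
  induction xs using pvEvens.induct with
  | case1 => simp [pvEvens]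
  | case2 a => simp [pvEvens]
  | case3 a b t ih =>
    have hc : (((a :: b :: t).length + 1) / 2) = (t.length + 1) / 2 + 1 := by
      simp only [List.length_cons]; omega
    rw [hc, List.range_succ_eq_map, List.filterMap_cons, List.filterMap_map]
    simp only [Nat.mul_zero, List.getElem?_cons_zero]
    have : (fun k : Nat => (a :: b :: t)[2 * k.succ]?) = (fun k : Nat => t[2 * k]?) := by
      funext k
      have h2 : 2 * k.succ = (2 * k) + 1 + 1 := by omega
      rw [h2, List.getElem?_cons_succ, List.getElem?_cons_succ]
    rw [show ((fun k : Nat => (a :: b :: t)[2 * k]?) ∘ Nat.succ) = (fun k : Nat => t[2 * k]?) from this ▸ rfl]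
    rw [ih, pvEvens]

theorem pv_fm_odds {α : Type} (xs : List α) :
    List.filterMap (fun k : Nat => xs[1 + 2 * k]?) (List.range (xs.length / 2)) = pvOdds xs := by
  induction xs using pvEvens.induct with
  | case1 => simp [pvOdds]
  | case2 a => simp [pvOdds, pvEvens]
  | case3 a b t ih =>
    have hc : ((a :: b :: t).length / 2) = t.length / 2 + 1 := by
      simp only [List.length_cons]; omega
    rw [hc, List.range_succ_eq_map, List.filterMap_cons, List.filterMap_map]
    simp only [Nat.mul_zero, Nat.add_zero, List.getElem?_cons_succ, List.getElem?_cons_zero]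
    have : ((fun k : Nat => (a :: b :: t)[1 + 2 * k]?) ∘ Nat.succ) = (fun k : Nat => t[1 + 2 * k]?) := by
      funext k
      show (a :: b :: t)[1 + 2 * k.succ]? = _
      have h2 : 1 + 2 * k.succ = (1 + 2 * k) + 1 + 1 := by omega
      rw [h2, List.getElem?_cons_succ, List.getElem?_cons_succ]
    rw [this, ih]
    cases t <;> rfl

theorem pv_slice2_evens {α : Type} (xs : List α) :
    PySem.List.slice? xs none none 2 = some (pvEvens xs) := by
  simp only [PySem.List.slice?, PySem.List.sliceIndices, Int.reduceLT, reduceIte,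
    OfNat.ofNat_ne_zero]
  have hc : (if (0:Int) < (xs.length:Int) then (((xs.length:Int) - 0 + 2 - 1)/2).toNat else 0)
      = (xs.length + 1) / 2 := by split <;> omega
  have hf : (fun x : Nat => xs[((0:Int) + 2 * (x:Int)).toNat]?) = (fun k : Nat => xs[2 * k]?) := by
    funext k; congr 1; omega
  rw [hc, hf, pv_fm_evens]

theorem pv_slice2_odds {α : Type} (xs : List α) :
    PySem.List.slice? xs (some 1) none 2 = some (pvOdds xs) := by
  simp only [PySem.List.slice?, PySem.List.sliceIndices, Int.reduceLT, reduceIte,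
    OfNat.ofNat_ne_zero]
  rcases xs with _ | ⟨a, t⟩
  · simp [pvOdds]
  · have hmin : min (1:Int) (((a :: t).length : Nat) : Int) = 1 := by
      simp only [List.length_cons]; omega
    rw [hmin]
    have hc : (if (1:Int) < (((a :: t).length : Nat):Int) then (((((a :: t).length : Nat):Int) - 1 + 2 - 1)/2).toNat else 0)
        = (a :: t).length / 2 := by simp only [List.length_cons]; split <;> omega
    have hf : (fun x : Nat => (a :: t)[((1:Int) + 2 * (x:Int)).toNat]?) = (fun k : Nat => (a :: t)[1 + 2 * k]?) := by
      funext k; congr 1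
    rw [hc, hf, pv_fm_odds]

theorem pv_mod2 (k : Int) : PySem.Int.mod k 2 = k % 2 := by
  simp [PySem.Int.mod, Int.fmod_eq_emod]

theorem pv_foldA (l : List Char) : ∀ (k : Int) (vis : PySem.Set (Int × Int)) (s r : Int × Int),
    ((PySem.List.enumerate l k).foldl
      (fun (st : PySem.Set (Int × Int) × (Int × Int) × (Int × Int)) p =>
        let (visited, santa_location, robosanta_location) := st
        if PySem.Int.mod p.1 2 = 0 then
          let santa_location := sum_tuple santa_location (pvLookup p.2)
          (PySem.Set.add visited santa_location, santa_location, robosanta_location)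
        else
          let robosanta_location := sum_tuple robosanta_location (pvLookup p.2)
          (PySem.Set.add visited robosanta_location, santa_location, robosanta_location))
      (vis, s, r)).1
    = PySem.Set.update vis (if PySem.Int.mod k 2 = 0 then pvIPath s r l else pvIPath r s l) := by
  induction l with
  | nil =>
    intro k vis s r
    simp [PySem.List.enumerate_nil, PySem.Set.update, pvIPath]
  | cons c cs ih =>
    intro k vis s r
    rw [PySem.List.enumerate_cons, List.foldl_cons]
    by_cases hk : PySem.Int.mod k 2 = 0
    · have hk1 : ¬ PySem.Int.mod (k + 1) 2 = 0 := by
        rw [pv_mod2] at *; omega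
      simp only [hk, if_true, ih (k + 1), hk1, if_false]
      simp [pvIPath, sum_tuple, PySem.Set.update]
    · have hk1 : PySem.Int.mod (k + 1) 2 = 0 := by
        rw [pv_mod2] at *; omega
      simp only [hk, if_false, ih (k + 1), hk1, if_true]
      simp [pvIPath, sum_tuple, PySem.Set.update]

theorem pv_foldB (moves : List Char) : ∀ (vis : PySem.Set (Int × Int)) (x y : Int),
    (moves.foldl
      (fun (st : PySem.Set (Int × Int) × Int × Int) instruction =>
        let (visited, x, y) := st
        let d := pvLookup instruction
        let x := x + d.1
        let y := y + d.2
        (PySem.Set.add visited (x, y), x, y))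
      (vis, x, y)).1 = PySem.Set.update vis (pvPath (x, y) moves) := by
  induction moves with
  | nil => intro vis x y; simp [PySem.Set.update, pvPath]
  | cons c cs ih =>
    intro vis x y
    rw [List.foldl_cons]
    simp only [ih]
    simp [pvPath, PySem.Set.update]

theorem pv_update_append {α : Type} [BEq α] (s : PySem.Set α) (xs ys : List α) :
    PySem.Set.update s (xs ++ ys) = PySem.Set.update (PySem.Set.update s xs) ys := by
  simp [PySem.Set.update, List.foldl_append]

theorem pv_len_update_perm (vis : PySem.Set (Int × Int)) (hn : vis.Nodup)
    {xs ys : List (Int × Int)} (h : xs.Perm ys) :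
    (PySem.Set.update vis xs).length = (PySem.Set.update vis ys).length := by
  have n1 := PySem.Set.nodup_update vis xs hn
  have n2 := PySem.Set.nodup_update vis ys hn
  have hp : (PySem.Set.update vis xs).Perm (PySem.Set.update vis ys) :=
    (List.perm_ext_iff_of_nodup n1 n2).2 (by
      intro a
      simp [PySem.Set.mem_update, h.mem_iff])
  exact hp.length_eq

-- ===== VERDICT (by name: the statement is the Claim_ definition above) =====
theorem houses_visited_with_robot_spec : Claim_equal_houses_visited_with_robot := by
  intro instructions _ _
  unfold Spec_houses_visited_with_robot
  unfold houses_visited_with_robot houses_visited_with_robot_alt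
  rw [pv_slice2_evens, pv_slice2_odds]
  simp only [List.foldl_cons, List.foldl_nil, Option.getD_some]
  rw [pv_foldA _ 0, pv_foldB, pv_foldB]
  rw [← pv_update_append]
  unfold PySem.Set.len
  congr 1
  refine pv_len_update_perm _ (by decide) ?_
  simpa [pv_mod2] using pvIPath_perm instructions.toList (0, 0) (0, 0)
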